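-- pv_equiv track=rewrite | github.com/CharlesPinet/Lecture- | Untitled.py | analyze_stock_trend
-- ===== SOURCE A (Python) =====
-- def analyze_stock_trend(prices):
--     trend = None
--     increasing_count = sum(prices[i] < prices[i + 1] for i in range(len(prices) - 1))
--     decreasing_count = sum(prices[i] > prices[i + 1] for i in range(len(prices) - 1))
--
--     if increasing_count > decreasing_count:
--         trend = "increasing"
--     elif increasing_count < decreasing_count:
--         trend = "decreasing"
--     else:
--         trend = "stable"
--
--     return trend
-- ===== SOURCE B (Python) =====
-- def analyze_stock_trend(prices):
--     # Stage 1: compress runs of equal consecutive prices (equal steps carry no trend).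
--     comp = []
--     for p in prices:
--         if not comp or comp[-1] != p:
--             comp.append(p)
--     m = len(comp) - 1          # every one of these m steps is strictly up or strictly down
--     if m <= 0:
--         return "stable"
--     # Stage 2: count only the ascents; descents = m - ups, so the net sign is 2*ups - m.
--     ups = sum(a < b for a, b in zip(comp, comp[1:]))
--     if 2 * ups > m:
--         return "increasing"
--     if 2 * ups < m:
--         return "decreasing"
--     return "stable"
-- ===== Notes on version B (the rewrite author's own statement) =====
-- stated objective: alternative
-- what changed: B first materializes a run-compressed list (consecutive duplicates removed), where every adjacent step is strictly up or down, counts only the ascents, and decides the trend by comparing 2*ups with the number of steps m (descents = m - ups), instead of A's two separate up/down count passes compared against each other.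
import Mathlib
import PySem

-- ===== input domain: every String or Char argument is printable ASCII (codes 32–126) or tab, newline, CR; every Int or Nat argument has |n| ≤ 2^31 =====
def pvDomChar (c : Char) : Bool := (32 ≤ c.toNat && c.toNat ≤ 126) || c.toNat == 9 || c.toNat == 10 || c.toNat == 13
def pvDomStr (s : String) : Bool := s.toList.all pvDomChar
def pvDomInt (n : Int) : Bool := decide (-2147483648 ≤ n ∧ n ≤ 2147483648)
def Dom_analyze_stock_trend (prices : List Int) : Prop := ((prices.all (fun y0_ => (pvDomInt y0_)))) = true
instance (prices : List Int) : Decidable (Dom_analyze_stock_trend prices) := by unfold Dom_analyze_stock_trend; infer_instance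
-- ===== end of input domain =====

-- B compresses runs of equal consecutive prices, counts only the ascents of the compressed
-- list, and decides by comparing 2*ups with the step count m (objective: alternative).

-- ===== PORT A =====
-- indices i and i+1 are always in range, so pyGetD with default 0 is exact here
def analyze_stock_trend (prices : List Int) : String :=
  let increasing_count : Int :=
    (PySem.List.pyRange 0 ((prices.length : Int) - 1) 1).foldl
      (fun s i => s + (if PySem.List.pyGetD prices i 0 < PySem.List.pyGetD prices (i + 1) 0 then 1 else 0)) 0
  let decreasing_count : Int :=
    (PySem.List.pyRange 0 ((prices.length : Int) - 1) 1).foldl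
      (fun s i => s + (if PySem.List.pyGetD prices i 0 > PySem.List.pyGetD prices (i + 1) 0 then 1 else 0)) 0
  if increasing_count > decreasing_count then "increasing"
  else if increasing_count < decreasing_count then "decreasing"
  else "stable"

-- ===== PORT B =====
-- comp[-1] is guarded by the emptiness test, so pyGetD with default 0 is exact here
def analyze_stock_trend_alt (prices : List Int) : String :=
  let comp : List Int :=
    prices.foldl (fun comp p => if comp.isEmpty || PySem.List.pyGetD comp (-1) 0 ≠ p then comp ++ [p] else comp) []
  let m : Int := (comp.length : Int) - 1
  if m ≤ 0 then "stable"
  else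
    let ups : Int := (comp.zip comp.tail).foldl (fun s q => s + (if q.1 < q.2 then 1 else 0)) 0
    if 2 * ups > m then "increasing"
    else if 2 * ups < m then "decreasing"
    else "stable"

-- ===== PRECONDITION & SPEC =====
def Spec_analyze_stock_trend (prices : List Int) (out : String) : Prop := out = analyze_stock_trend_alt prices
instance (prices : List Int) (out : String) : Decidable (Spec_analyze_stock_trend prices out) := by unfold Spec_analyze_stock_trend; infer_instance

-- ===== CLAIM (what is proved, stated in full; the proofs are below) =====
def Claim_equal_analyze_stock_trend : Prop := ∀ (prices : List Int), Dom_analyze_stock_trend prices → Spec_analyze_stock_trend prices (analyze_stock_trend prices)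

-- ===== LEMMAS AND PROOFS =====

-- proof-side characterisation of B's compression loop
def pvGo (prev : Int) : List Int → List Int
  | [] => []
  | b :: t => if b = prev then pvGo prev t else b :: pvGo b t

def pvDedup : List Int → List Int
  | [] => []
  | a :: t => a :: pvGo a t

theorem fold_go (t : List Int) : ∀ (acc : List Int) (x : Int), acc ≠ [] → PySem.List.pyGetD acc (-1) 0 = x →
    t.foldl (fun comp p => if comp.isEmpty || PySem.List.pyGetD comp (-1) 0 ≠ p then comp ++ [p] else comp) acc
      = acc ++ pvGo x t := by
  induction t with
  | nil => intro acc x _ _; simp [pvGo]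
  | cons b t ih =>
    intro acc x hne hlast
    simp only [List.foldl_cons]
    by_cases hbx : b = x
    · subst hbx
      rw [if_neg (by simp [List.isEmpty_iff, hne, hlast])]
      rw [ih acc b hne hlast]
      have : pvGo b (b :: t) = pvGo b t := by simp [pvGo]
      rw [this]
    · have hxb : x ≠ b := fun h => hbx h.symm
      rw [if_pos (by simp [hlast, hxb])]
      rw [ih (acc ++ [b]) b (by simp) (PySem.List.pyGetD_neg_one_append_singleton acc b 0)]
      have : pvGo x (b :: t) = b :: pvGo b t := by simp [pvGo, hbx]
      rw [this, List.append_assoc]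
      rfl

theorem fold_comp (l : List Int) :
    l.foldl (fun comp p => if comp.isEmpty || PySem.List.pyGetD comp (-1) 0 ≠ p then comp ++ [p] else comp) []
      = pvDedup l := by
  cases l with
  | nil => rfl
  | cons a t =>
    simp only [List.foldl_cons, List.isEmpty_nil, Bool.true_or, List.nil_append, pvDedup]
    rw [if_pos (by simp)]
    have hlast : PySem.List.pyGetD [a] (-1) 0 = a := by
      rw [PySem.List.pyGetD_neg_one [a] 0 (by simp)]; rfl
    exact fold_go t [a] a (by simp) hlast

-- compression preserves any count of adjacent pairs that ignores equal pairs
theorem count_go (p : Int × Int → Bool) (hp : ∀ x, p (x, x) = false) :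
    ∀ (t : List Int) (a : Int),
      ((a :: pvGo a t).zip (pvGo a t)).countP p = ((a :: t).zip t).countP p := by
  intro t
  induction t with
  | nil => intro a; simp [pvGo]
  | cons b t ih =>
    intro a
    by_cases hba : b = a
    · subst hba
      have h1 : pvGo b (b :: t) = pvGo b t := by simp [pvGo]
      rw [h1, ih b]
      simp [hp]
    · have h1 : pvGo a (b :: t) = b :: pvGo b t := by simp [pvGo, hba]
      rw [h1]
      simp only [List.zip_cons_cons, List.countP_cons]
      rw [ih b]

-- in the compressed list every adjacent pair is strict, so up-count + down-count = step count
theorem go_strict_total : ∀ (t : List Int) (a : Int),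
    ((a :: pvGo a t).zip (pvGo a t)).countP (fun q => decide (q.1 < q.2))
      + ((a :: pvGo a t).zip (pvGo a t)).countP (fun q => decide (q.1 > q.2))
      = (pvGo a t).length := by
  intro t
  induction t with
  | nil => intro a; simp [pvGo]
  | cons b t ih =>
    intro a
    by_cases hba : b = a
    · subst hba
      have h1 : pvGo b (b :: t) = pvGo b t := by simp [pvGo]
      rw [h1]; exact ih b
    · have h1 : pvGo a (b :: t) = b :: pvGo b t := by simp [pvGo, hba]
      rw [h1]
      simp only [List.zip_cons_cons, List.countP_cons, List.length_cons]
      have h2 := ih b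
      rcases lt_trichotomy a b with h | h | h
      · have e1 : decide (a < b) = true := by simp [h]
        have e2 : decide (a > b) = false := by simp; omega
        have r1 : (if (true : Bool) = true then (1 : Nat) else 0) = 1 := rfl
        have r2 : (if (false : Bool) = true then (1 : Nat) else 0) = 0 := rfl
        rw [e1, e2, r1, r2]
        omega
      · exact absurd h (fun hh => hba hh.symm)
      · have e1 : decide (a < b) = false := by simp; omega
        have e2 : decide (a > b) = true := by simp [h]
        have r1 : (if (true : Bool) = true then (1 : Nat) else 0) = 1 := rfl
        have r2 : (if (false : Bool) = true then (1 : Nat) else 0) = 0 := rfl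
        rw [e1, e2, r1, r2]
        omega

-- the index pairs A reads are exactly the zipped adjacent pairs
theorem pairs_eq (l : List Int) :
    (List.range (l.length - 1)).map (fun k => (l.getD k 0, l.getD (k + 1) 0)) = l.zip l.tail := by
  induction l with
  | nil => simp
  | cons a t ih =>
    cases t with
    | nil => simp
    | cons b t' =>
      have h := ih
      simp only [List.length_cons, Nat.add_sub_cancel] at h ⊢
      rw [List.range_succ_eq_map]
      simp only [List.map_cons, List.map_map]
      simp only [List.zip_cons_cons, List.tail_cons] at h ⊢
      refine congrArg (List.cons _) ?_
      rw [← h]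
      simp [Function.comp, List.getD]

-- A's counting fold equals a countP over the zipped pairs
theorem countA (l : List Int) (p : Int × Int → Bool) :
    (PySem.List.pyRange 0 ((l.length : Int) - 1) 1).foldl
      (fun s i => s + (if p (PySem.List.pyGetD l i 0, PySem.List.pyGetD l (i + 1) 0) then (1 : Int) else 0)) 0
    = ((l.zip l.tail).countP p : Int) := by
  rw [PySem.List.foldl_add (g := fun i => if p (PySem.List.pyGetD l i 0, PySem.List.pyGetD l (i + 1) 0) then (1 : Int) else 0)]
  rw [PySem.List.pyRange_zero]
  have ht : ((l.length : Int) - 1).toNat = l.length - 1 := by omega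
  rw [ht, List.map_map]
  have hmap : (List.range (l.length - 1)).map
      ((fun i => if p (PySem.List.pyGetD l i 0, PySem.List.pyGetD l (i + 1) 0) then (1 : Int) else 0) ∘ (fun k : Nat => (k : Int)))
      = (List.range (l.length - 1)).map (fun k => if p (l.getD k 0, l.getD (k + 1) 0) then (1 : Int) else 0) := by
    apply List.map_congr_left
    intro k _
    have h1 : PySem.List.pyGetD l (k : Int) 0 = l.getD k 0 := PySem.List.pyGetD_natCast l k 0
    have h2 : PySem.List.pyGetD l ((k : Int) + 1) 0 = l.getD (k + 1) 0 := by
      have : ((k : Int) + 1) = ((k + 1 : Nat) : Int) := by push_cast; ring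
      rw [this, PySem.List.pyGetD_natCast]
    simp [Function.comp, h1, h2]
  rw [hmap, zero_add]
  have := pairs_eq l
  calc ((List.range (l.length - 1)).map (fun k => if p (l.getD k 0, l.getD (k + 1) 0) then (1 : Int) else 0)).sum
      = (((List.range (l.length - 1)).map (fun k => (l.getD k 0, l.getD (k + 1) 0))).map (fun q => if p q then (1 : Int) else 0)).sum := by
        rw [List.map_map]
        rfl
    _ = (((l.zip l.tail).map (fun q => if p q then (1 : Int) else 0)).sum) := by rw [this]
    _ = ((l.zip l.tail).countP p : Int) := by
        rw [PySem.List.sum_map_ite_one_zero]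

-- B's ascent fold equals a countP over the zipped pairs of the compressed list
theorem upsB (c : List Int) :
    (c.zip c.tail).foldl (fun s q => s + (if q.1 < q.2 then (1 : Int) else 0)) 0
      = ((c.zip c.tail).countP (fun q => decide (q.1 < q.2)) : Int) := by
  rw [PySem.List.foldl_add (g := fun q : Int × Int => if q.1 < q.2 then (1 : Int) else 0), zero_add]
  rw [show (fun q : Int × Int => if q.1 < q.2 then (1 : Int) else 0)
        = (fun q : Int × Int => if (fun q : Int × Int => decide (q.1 < q.2)) q = true then (1 : Int) else 0) from by
      funext q; simp]
  rw [PySem.List.sum_map_ite_one_zero]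

-- ===== VERDICT (by name: the statement is the Claim_ definition above) =====
theorem analyze_stock_trend_spec : Claim_equal_analyze_stock_trend := by
  intro prices _
  unfold Spec_analyze_stock_trend analyze_stock_trend analyze_stock_trend_alt
  have hI := countA prices (fun q => decide (q.1 < q.2))
  have hD := countA prices (fun q => decide (q.1 > q.2))
  simp only [decide_eq_true_eq] at hI hD
  rw [hI, hD, fold_comp]
  dsimp only
  rw [upsB]
  cases prices with
  | nil => simp [pvDedup]
  | cons a t =>
    simp only [pvDedup, List.tail_cons]
    simp only [count_go (fun q => decide (q.1 < q.2)) (by simp) t a]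
    have htot := go_strict_total t a
    rw [count_go (fun q => decide (q.1 < q.2)) (by simp) t a,
        count_go (fun q => decide (q.1 > q.2)) (by simp) t a] at htot
    simp only [List.length_cons]
    split_ifs <;> first | rfl | omega
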